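-- pv_equiv track=rewrite | github.com/rliu054/machine-learning-from-scratch | Apriori/apriori.py | gen_set_list_size_one
-- ===== SOURCE A (Python) =====
-- def gen_set_list_size_one(data_set):
--     """ Get a list of itemsets with length 1. """
--     itemsets = []
--     for trans in data_set:
--         for item in trans:
--             if [item] not in itemsets:
--                 itemsets.append([item])
--     itemsets.sort()
--     return list(map(frozenset, itemsets))
-- ===== SOURCE B (Python) =====
-- def gen_set_list_size_one(data_set):
--     """ Get a list of itemsets with length 1 (sort once, adjacent dedup). """
--     items = []
--     for trans in data_set:
--         items.extend(trans)
--     items.sort()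
--     out = []
--     for x in items:
--         if not out or out[-1] != x:
--             out.append(x)
--     return [frozenset([x]) for x in out]
-- ===== Notes on version B (the rewrite author's own statement) =====
-- stated objective: faster
-- what changed: Replaces A's per-item linear membership scan over the growing itemsets list with a flatten-once, sort-once, adjacent-duplicate-removal single pass.
import Mathlib
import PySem

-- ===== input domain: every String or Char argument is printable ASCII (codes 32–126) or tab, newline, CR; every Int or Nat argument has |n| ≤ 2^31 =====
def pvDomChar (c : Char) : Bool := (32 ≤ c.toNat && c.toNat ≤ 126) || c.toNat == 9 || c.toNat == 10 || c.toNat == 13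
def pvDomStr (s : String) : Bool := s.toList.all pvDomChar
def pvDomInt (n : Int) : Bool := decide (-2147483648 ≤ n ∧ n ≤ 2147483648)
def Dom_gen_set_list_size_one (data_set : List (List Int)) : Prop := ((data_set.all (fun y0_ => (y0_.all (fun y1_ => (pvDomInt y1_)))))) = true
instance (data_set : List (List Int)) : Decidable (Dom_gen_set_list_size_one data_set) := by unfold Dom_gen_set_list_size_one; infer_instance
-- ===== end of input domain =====

-- B replaces A's quadratic membership-scan dedup by flatten once, sort once, and one
-- adjacent-duplicate-removal pass (objective: faster, O(n^2) -> O(n log n)).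


-- ===== PORT A =====
def gen_set_list_size_one (data_set : List (List Int)) : List (List Int) :=
  let itemsets : List (List Int) :=
    data_set.foldl (fun itemsets trans =>
      trans.foldl (fun itemsets item =>
        if [item] ∈ itemsets then itemsets else itemsets ++ [[item]]) itemsets) []
  let itemsets := PySem.List.sorted itemsets (fun x => x) false
  itemsets.map (fun l => PySem.Set.ofList l)

-- ===== PORT B =====
def gen_set_list_size_one_alt (data_set : List (List Int)) : List (List Int) :=
  let items : List Int := data_set.foldl (fun acc trans => acc ++ trans) []
  let items := PySem.List.sorted items (fun x => x) false
  let out : List Int := items.foldl (fun out x =>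
    if out = [] ∨ out.getLast? ≠ some x then out ++ [x] else out) []
  out.map (fun x => PySem.Set.ofList [x])

-- ===== PRECONDITION & SPEC =====
def Spec_gen_set_list_size_one (data_set : List (List Int)) (out : List (List Int)) : Prop := out = gen_set_list_size_one_alt data_set
instance (data_set : List (List Int)) (out : List (List Int)) : Decidable (Spec_gen_set_list_size_one data_set out) := by unfold Spec_gen_set_list_size_one; infer_instance

-- ===== CLAIM (what is proved, stated in full; the proofs are below) =====
def Claim_equal_gen_set_list_size_one : Prop := ∀ (data_set : List (List Int)), Dom_gen_set_list_size_one data_set → Spec_gen_set_list_size_one data_set (gen_set_list_size_one data_set)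

-- ===== LEMMAS AND PROOFS =====

-- Int-level first-seen dedup step (what A's inner test does, stripped of the singleton wrapper)
def pvDedupStep (acc : List Int) (x : Int) : List Int := if x ∈ acc then acc else acc ++ [x]

-- A's accumulation of singleton itemsets is the image under [·] of the Int-level dedup fold.
theorem pv_inner_map (trans : List Int) : ∀ (acc : List Int),
    trans.foldl (fun its item => if [item] ∈ its then its else its ++ [[item]])
        (acc.map (fun x => [x]))
      = (trans.foldl pvDedupStep acc).map (fun x => [x]) := by
  induction trans with
  | nil => intro acc; rfl
  | cons x t ih =>
    intro acc
    have hmem : ([x] ∈ acc.map (fun x => [x])) ↔ x ∈ acc := by simp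
    by_cases hx : x ∈ acc
    · simp [List.foldl_cons, pvDedupStep, hx, hmem.mpr hx, ih]
    · have : ¬ ([x] ∈ acc.map (fun x => [x])) := fun h => hx (hmem.mp h)
      simp only [List.foldl_cons, pvDedupStep, if_neg hx, if_neg this]
      rw [show acc.map (fun x => [x]) ++ [[x]] = (acc ++ [x]).map (fun x => [x]) by simp]
      exact ih (acc ++ [x])

theorem pv_outer_map (ds : List (List Int)) : ∀ (acc : List Int),
    ds.foldl (fun its trans =>
        trans.foldl (fun its item => if [item] ∈ its then its else its ++ [[item]]) its)
        (acc.map (fun x => [x]))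
      = (ds.foldl (fun a t => t.foldl pvDedupStep a) acc).map (fun x => [x]) := by
  induction ds with
  | nil => intro acc; rfl
  | cons tr ds ih =>
    intro acc
    simp only [List.foldl_cons]
    rw [pv_inner_map tr acc, ih]

theorem pv_mem_dedup (l : List Int) : ∀ (acc : List Int) (x : Int),
    x ∈ l.foldl pvDedupStep acc ↔ x ∈ acc ∨ x ∈ l := by
  induction l with
  | nil => simp
  | cons y t ih =>
    intro acc x
    simp only [List.foldl_cons, pvDedupStep]
    by_cases hy : y ∈ acc
    · rw [if_pos hy, ih]
      constructor
      · rintro (h | h) <;> simp [h]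
      · rintro (h | h)
        · exact Or.inl h
        · rcases List.mem_cons.1 h with rfl | h
          · exact Or.inl hy
          · exact Or.inr h
    · rw [if_neg hy, ih]
      simp only [List.mem_append, List.mem_cons]
      tauto

theorem pv_nodup_dedup (l : List Int) : ∀ (acc : List Int), acc.Nodup →
    (l.foldl pvDedupStep acc).Nodup := by
  induction l with
  | nil => intro acc h; exact h
  | cons y t ih =>
    intro acc h
    simp only [List.foldl_cons, pvDedupStep]
    by_cases hy : y ∈ acc
    · rw [if_pos hy]; exact ih acc h
    · rw [if_neg hy]
      refine ih _ ?_
      have hne : ∀ a ∈ acc, ¬ a = y := fun a ha h' => hy (h' ▸ ha)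
      simp [List.nodup_append, h]
      exact hne

theorem pv_mem_D (ds : List (List Int)) : ∀ (acc : List Int) (x : Int),
    x ∈ ds.foldl (fun a t => t.foldl pvDedupStep a) acc ↔ x ∈ acc ∨ ∃ t ∈ ds, x ∈ t := by
  induction ds with
  | nil => simp
  | cons tr ds ih =>
    intro acc x
    simp only [List.foldl_cons]
    rw [ih, pv_mem_dedup]
    simp only [List.mem_cons]
    constructor
    · rintro ((h | h) | ⟨t, ht, hx⟩)
      · exact Or.inl h
      · exact Or.inr ⟨tr, Or.inl rfl, h⟩
      · exact Or.inr ⟨t, Or.inr ht, hx⟩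
    · rintro (h | ⟨t, (rfl | ht), hx⟩)
      · exact Or.inl (Or.inl h)
      · exact Or.inl (Or.inr hx)
      · exact Or.inr ⟨t, ht, hx⟩

theorem pv_nodup_D (ds : List (List Int)) : ∀ (acc : List Int), acc.Nodup →
    (ds.foldl (fun a t => t.foldl pvDedupStep a) acc).Nodup := by
  induction ds with
  | nil => intro acc h; exact h
  | cons tr ds ih => intro acc h; exact ih _ (pv_nodup_dedup tr acc h)

theorem pv_mem_flat (ds : List (List Int)) : ∀ (acc : List Int) (x : Int),
    x ∈ ds.foldl (fun acc trans => acc ++ trans) acc ↔ x ∈ acc ∨ ∃ t ∈ ds, x ∈ t := by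
  induction ds with
  | nil => simp
  | cons tr ds ih =>
    intro acc x
    simp only [List.foldl_cons]
    rw [ih]
    simp only [List.mem_append, List.mem_cons]
    constructor
    · rintro ((h | h) | ⟨t, ht, hx⟩)
      · exact Or.inl h
      · exact Or.inr ⟨tr, Or.inl rfl, h⟩
      · exact Or.inr ⟨t, Or.inr ht, hx⟩
    · rintro (h | ⟨t, (rfl | ht), hx⟩)
      · exact Or.inl (Or.inl h)
      · exact Or.inl (Or.inr hx)
      · exact Or.inr ⟨t, ht, hx⟩

-- all elements of a ≤-sorted list are ≤ its last element
theorem pv_le_getLast (l : List Int) : ∀ (m a : Int), l.Pairwise (· ≤ ·) →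
    l.getLast? = some m → a ∈ l → a ≤ m := by
  induction l with
  | nil => simp
  | cons x t ih =>
    intro m a hp hl ha
    cases t with
    | nil =>
      simp at hl ha; omega
    | cons y u =>
      rw [List.getLast?_cons_cons] at hl
      have hp' := (List.pairwise_cons.1 hp)
      rcases List.mem_cons.1 ha with rfl | ha'
      · exact hp'.1 m (List.mem_of_getLast? hl)
      · exact ih m a hp'.2 hl ha'

-- the adjacent-dedup fold: strictly sorted output, same members as input ++ carry
theorem pv_AD (l : List Int) : ∀ (acc : List Int), acc.Pairwise (· < ·) →
    l.Pairwise (· ≤ ·) → (∀ a ∈ acc, ∀ b ∈ l, a ≤ b) →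
    (l.foldl (fun out x => if out = [] ∨ out.getLast? ≠ some x then out ++ [x] else out) acc).Pairwise (· < ·)
    ∧ ∀ x, x ∈ l.foldl (fun out x => if out = [] ∨ out.getLast? ≠ some x then out ++ [x] else out) acc
        ↔ x ∈ acc ∨ x ∈ l := by
  induction l with
  | nil => intro acc hacc _ _; exact ⟨hacc, by simp⟩
  | cons x t ih =>
    intro acc hacc hl hle
    have hx : ∀ b ∈ t, x ≤ b := (List.pairwise_cons.1 hl).1
    have ht : t.Pairwise (· ≤ ·) := (List.pairwise_cons.1 hl).2
    simp only [List.foldl_cons]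
    by_cases hc : acc = [] ∨ acc.getLast? ≠ some x
    · rw [if_pos hc]
      have hlt : ∀ a ∈ acc, a < x := by
        intro a ha
        rcases hc with rfl | hne
        · simp at ha
        · cases hm : acc.getLast? with
          | none => simp [List.getLast?_eq_none_iff] at hm; subst hm; simp at ha
          | some m =>
            have ham : a ≤ m := pv_le_getLast acc m a (hacc.imp le_of_lt) hm ha
            have hmx : m ≤ x := hle m (List.mem_of_getLast? hm) x (List.mem_cons_self)
            have : m ≠ x := by rw [hm] at hne; intro h; exact hne (by rw [h])
            omega
      have hacc' : (acc ++ [x]).Pairwise (· < ·) := by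
        rw [List.pairwise_append]
        exact ⟨hacc, by simp, by simpa using hlt⟩
      have hle' : ∀ a ∈ acc ++ [x], ∀ b ∈ t, a ≤ b := by
        intro a ha b hb
        rcases List.mem_append.1 ha with ha | ha
        · exact hle a ha b (List.mem_cons_of_mem _ hb)
        · simp at ha; subst ha; exact hx b hb
      obtain ⟨h1, h2⟩ := ih (acc ++ [x]) hacc' ht hle'
      refine ⟨h1, fun y => ?_⟩
      rw [h2 y]
      simp only [List.mem_append, List.mem_cons]
      tauto
    · rw [if_neg hc]
      simp only [not_or, not_not] at hc
      have hxacc : x ∈ acc := List.mem_of_getLast? hc.2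
      have hle' : ∀ a ∈ acc, ∀ b ∈ t, a ≤ b := fun a ha b hb =>
        le_trans (hle a ha x List.mem_cons_self) (hx b hb)
      obtain ⟨h1, h2⟩ := ih acc hacc ht hle'
      refine ⟨h1, fun y => ?_⟩
      rw [h2 y]
      simp only [List.mem_cons]
      constructor
      · rintro (h | h)
        · exact Or.inl h
        · exact Or.inr (Or.inr h)
      · rintro (h | (rfl | h))
        · exact Or.inl h
        · exact Or.inl hxacc
        · exact Or.inr h

-- insertion by the list-lex order commutes with the singleton embedding
theorem pv_insertBy_map (x : Int) (acc : List Int) :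
    PySem.List.insertBy (fun a b => decide (a < b)) ([x] : List Int) (acc.map (fun x => [x]))
      = (PySem.List.insertBy (fun a b => decide (a < b)) x acc).map (fun x => [x]) := by
  induction acc with
  | nil => simp [PySem.List.insertBy]
  | cons y t ih =>
    have hd : (decide (([x] : List Int) < [y])) = decide (x < y) := by
      simp [List.cons_lt_cons_iff]
    simp only [List.map_cons, PySem.List.insertBy, hd]
    by_cases h : x < y
    · simp [h]
    · simp [h, ih]

theorem pv_sortfold_map (l : List Int) : ∀ (acc : List Int),
    (l.map (fun x => [x])).foldl
        (fun a y => PySem.List.insertBy (fun a b => decide (a < b)) y a) (acc.map (fun x => [x]))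
      = (l.foldl (fun a y => PySem.List.insertBy (fun a b => decide (a < b)) y a) acc).map
          (fun x => [x]) := by
  induction l with
  | nil => intro acc; rfl
  | cons x t ih =>
    intro acc
    simp only [List.map_cons, List.foldl_cons]
    rw [pv_insertBy_map, ih]

theorem pv_ofList_singleton (x : Int) : PySem.Set.ofList ([x] : List Int) = [x] := rfl

-- ===== VERDICT (by name: the statement is the Claim_ definition above) =====
theorem gen_set_list_size_one_spec : Claim_equal_gen_set_list_size_one := by
  intro data_set _
  unfold Spec_gen_set_list_size_one gen_set_list_size_one gen_set_list_size_one_alt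
  simp only []
  -- names
  set D := data_set.foldl (fun a t => t.foldl pvDedupStep a) ([] : List Int) with hD
  set F := data_set.foldl (fun acc trans => acc ++ trans) ([] : List Int) with hF
  set S := PySem.List.sorted F (fun x => x) false with hS
  set out := S.foldl (fun out x => if out = [] ∨ out.getLast? ≠ some x then out ++ [x] else out)
      ([] : List Int) with hout
  -- A's accumulated itemsets are the singleton image of the Int-level dedup D
  have hA0 : data_set.foldl (fun its trans =>
      trans.foldl (fun its item => if [item] ∈ its then its else its ++ [[item]]) its) []
      = D.map (fun x => [x]) := by
    have := pv_outer_map data_set []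
    simpa using this
  rw [hA0]
  -- sorting the singleton image is the image of the Int-level sort
  have hsortmap : PySem.List.sorted (D.map (fun x => [x])) (fun x => x) false
      = (PySem.List.sorted D (fun x => x) false).map (fun x => [x]) := by
    rw [PySem.List.sorted_eq_foldl_insertBy, PySem.List.sorted_eq_foldl_insertBy]
    have := pv_sortfold_map D []
    simpa using this
  rw [hsortmap]
  -- properties of the adjacent-dedup pass
  have hSp : S.Pairwise (· ≤ ·) := PySem.List.sorted_pairwise F (fun x => x)
  have hAD := pv_AD S [] (by simp) hSp (by simp)
  -- out is strictly sorted, with the same members as D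
  have hmem : ∀ x, x ∈ out ↔ x ∈ D := by
    intro x
    rw [hAD.2 x]
    have hxS : x ∈ S ↔ x ∈ F := PySem.List.mem_sorted F (fun x => x) false x
    rw [hD, hF] at *
    simp only [List.mem_nil_iff, false_or]
    rw [hxS, pv_mem_flat data_set [] x, pv_mem_D data_set [] x]
  have hperm : out.Perm D := by
    refine (List.perm_ext_iff_of_nodup ?_ ?_).2 hmem
    · exact hAD.1.nodup
    · exact pv_nodup_D data_set [] (by simp)
  have hsort : PySem.List.sorted D (fun x => x) false = out :=
    PySem.List.sorted_eq_of_perm_of_pairwise_lt D out (fun x => x) hperm hAD.1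
  rw [hsort]
  simp [pv_ofList_singleton]
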